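-- pv_equiv track=rewrite | github.com/rebibabo/SCTS | transform/transform_for_format.py | get_indent
-- ===== SOURCE A (Python) =====
-- def get_indent(start_byte, code):
--     indent = 0
--     i = start_byte
--     while i >= 0 and code[i] != '\n':
--         if code[i] == ' ':
--             indent += 1
--         elif code[i] == '\t':
--             indent += 4
--         i -= 1
--     return indent
-- ===== SOURCE B (Python) =====
-- def get_indent(start_byte, code):
--     if start_byte < 0:
--         return 0
--     line = code[:start_byte + 1].rpartition('\n')[2]
--     return line.count(' ') + 4 * line.count('\t')
-- ===== Notes on version B (the rewrite author's own statement) =====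
-- stated objective: faster
-- what changed: Replaces the backward char-by-char accumulating while-loop with a slice up to start_byte, rpartition('\n') to take the current line, and two str.count passes (C-level string operations instead of a Python loop).
import Mathlib
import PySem

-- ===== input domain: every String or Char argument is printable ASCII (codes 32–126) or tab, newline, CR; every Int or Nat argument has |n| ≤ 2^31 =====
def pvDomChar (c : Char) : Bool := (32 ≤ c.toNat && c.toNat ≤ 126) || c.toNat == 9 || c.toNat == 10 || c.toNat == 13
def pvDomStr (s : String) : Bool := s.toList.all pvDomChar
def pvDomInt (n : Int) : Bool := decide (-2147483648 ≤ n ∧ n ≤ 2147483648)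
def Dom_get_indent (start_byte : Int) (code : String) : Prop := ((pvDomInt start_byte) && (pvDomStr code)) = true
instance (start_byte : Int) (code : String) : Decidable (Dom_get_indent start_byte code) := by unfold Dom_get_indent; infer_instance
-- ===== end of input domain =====

-- B replaces A's backward char-by-char accumulating loop by slice + rpartition('\n') + two str.count passes (idiomatic).

-- ===== PORT A =====
-- A's while-loop: fuel = i + 1, so fuel = 0 is exactly the exit condition i < 0; the index read at fuel n+1 is i = n.
def get_indent_loop (code : String) : Nat → Int → Int
  | 0, indent => indent
  | n + 1, indent =>
    match PySem.Str.pyGet? code (n : Int) with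
    | none => indent     -- Python raises IndexError here; excluded by Pre_get_indent
    | some c =>
      if c = '\n' then indent
      else get_indent_loop code n
        (if c = ' ' then indent + 1 else if c = '\t' then indent + 4 else indent)

def get_indent (start_byte : Int) (code : String) : Int :=
  get_indent_loop code (start_byte + 1).toNat 0

-- ===== PORT B =====
-- s.rpartition('\n')[2] has no PySem primitive: hand port, exact — the suffix after the LAST '\n' (the whole string when '\n' is absent).
def rpartitionTailNl (cs : List Char) : List Char :=
  cs.foldl (fun acc c => if c = '\n' then [] else acc ++ [c]) []

def get_indent_alt (start_byte : Int) (code : String) : Int :=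
  if start_byte < 0 then 0
  else
    let line := rpartitionTailNl (PySem.Chars.slice code.toList none (some (start_byte + 1)))
    (PySem.Chars.count line [' '] : Int) + 4 * (PySem.Chars.count line ['\t'] : Int)

-- ===== PRECONDITION & SPEC =====
-- Pre_ excludes exactly start_byte ≥ len(code), where A's first subscript code[start_byte] raises IndexError.
def Pre_get_indent (start_byte : Int) (code : String) : Prop :=
  start_byte < (code.toList.length : Int)
instance (start_byte : Int) (code : String) : Decidable (Pre_get_indent start_byte code) := by
  unfold Pre_get_indent; infer_instance

def pvWitness_get_indent : Int × String := (2, "a b")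

def Spec_get_indent (start_byte : Int) (code : String) (out : Int) : Prop := out = get_indent_alt start_byte code
instance (start_byte : Int) (code : String) (out : Int) : Decidable (Spec_get_indent start_byte code out) := by unfold Spec_get_indent; infer_instance

-- ===== CLAIM (what is proved, stated in full; the proofs are below) =====
def Claim_equal_get_indent : Prop := ∀ (start_byte : Int) (code : String), Dom_get_indent start_byte code → Pre_get_indent start_byte code → Spec_get_indent start_byte code (get_indent start_byte code)

-- ===== LEMMAS AND PROOFS =====

-- Chars.count with a single-character needle is List.count.
lemma count_go_singleton (d : Char) (l : List Char) :
    ∀ (fuel acc : Nat), l.length ≤ fuel →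
      PySem.Chars.count.go [d] fuel l acc = acc + l.count d := by
  induction l with
  | nil => intro fuel acc _; cases fuel <;> simp [PySem.Chars.count.go]
  | cons c t ih =>
    intro fuel acc h
    cases fuel with
    | zero => simp at h
    | succ f =>
      by_cases hcd : d = c
      · subst hcd
        simp only [PySem.Chars.count.go, List.isPrefixOf]
        simp [ih f (acc + 1) (by simpa using h)]
        omega
      · simp only [PySem.Chars.count.go, List.isPrefixOf]
        have : (d == c) = false := by simp [hcd]
        simp [this, ih f acc (by simpa using h),
          show ¬ c = d from fun hh => hcd hh.symm]

lemma count_singleton (xs : List Char) (d : Char) :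
    PySem.Chars.count xs [d] = xs.count d := by
  simpa [PySem.Chars.count] using count_go_singleton d xs xs.length 0 le_rfl

lemma rpartitionTailNl_append (xs : List Char) (c : Char) :
    rpartitionTailNl (xs ++ [c]) =
      if c = '\n' then [] else rpartitionTailNl xs ++ [c] := by
  simp [rpartitionTailNl, List.foldl_append]

-- the weighted character count B computes, on a char list
def altVal (l : List Char) : Int :=
  ((rpartitionTailNl l).count ' ' : Int) + 4 * ((rpartitionTailNl l).count '\t' : Int)

lemma altVal_append (l : List Char) (c : Char) :
    altVal (l ++ [c]) =
      if c = '\n' then 0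
      else altVal l + (if c = ' ' then 1 else if c = '\t' then 4 else 0) := by
  unfold altVal
  rw [rpartitionTailNl_append]
  by_cases h : c = '\n'
  · simp [h]
  · simp only [h, if_false, List.count_append, List.count_singleton]
    by_cases h1 : c = ' '
    · simp [h1]; ring
    · by_cases h2 : c = '\t'
      · simp [h2]; ring
      · simp [h1, h2, show (c == ' ') = false by simp [h1],
          show (c == '\t') = false by simp [h2]]

lemma get_indent_loop_acc (code : String) (n : Nat) :
    ∀ ind : Int, get_indent_loop code n ind = ind + get_indent_loop code n 0 := by
  induction n with
  | zero => intro ind; simp [get_indent_loop]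
  | succ n ih =>
    intro ind
    simp only [get_indent_loop]
    cases h : PySem.Str.pyGet? code (n : Int) with
    | none => simp
    | some c =>
      by_cases hn : c = '\n'
      · simp [hn]
      · simp only [hn, if_false]
        rw [ih, ih (if c = ' ' then (0:Int) + 1 else if c = '\t' then (0:Int) + 4 else 0)]
        by_cases h1 : c = ' ' <;> by_cases h2 : c = '\t' <;> simp [h1, h2] <;> ring

lemma get_indent_loop_eq_altVal (code : String) :
    ∀ n : Nat, n ≤ code.toList.length →
      get_indent_loop code n 0 = altVal (code.toList.take n) := by
  intro n
  induction n with
  | zero => intro _; simp [get_indent_loop, altVal, rpartitionTailNl]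
  | succ n ih =>
    intro h
    have hn : n < code.toList.length := by omega
    have hget : PySem.Str.pyGet? code (n : Int) = some (code.toList[n]) := by
      simp [List.getElem?_eq_getElem hn]
    have htake : code.toList.take (n + 1) = code.toList.take n ++ [code.toList[n]] := by
      rw [List.take_add_one, List.getElem?_eq_getElem hn]; rfl
    set c := code.toList[n] with hc
    simp only [get_indent_loop, hget]
    rw [htake, altVal_append]
    by_cases hnl : c = '\n'
    · simp [hnl]
    · simp only [hnl, if_false]
      rw [get_indent_loop_acc, ih (by omega)]
      by_cases h1 : c = ' ' <;> by_cases h2 : c = '\t' <;> simp [h1, h2] <;> ring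

-- ===== VERDICT (by name: the statement is the Claim_ definition above) =====
theorem get_indent_spec : Claim_equal_get_indent := by
  intro start_byte code _ hpre
  unfold Spec_get_indent get_indent get_indent_alt
  by_cases hneg : start_byte < 0
  · have : (start_byte + 1).toNat = 0 := by omega
    simp [hneg, this, get_indent_loop]
  · have h0 : 0 ≤ start_byte := by omega
    obtain ⟨m, hm⟩ := Int.eq_ofNat_of_zero_le h0
    subst hm
    have hlen : m + 1 ≤ code.toList.length := by
      unfold Pre_get_indent at hpre; omega
    have hslice : PySem.Chars.slice code.toList none (some ((m : Int) + 1))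
        = code.toList.take (m + 1) := by
      have := PySem.List.slice_to (xs := code.toList) (b := (m : Int) + 1) (by omega)
      simpa [PySem.Chars.slice] using this
    simp only [hneg, if_false, hslice, count_singleton]
    have : ((m : Int) + 1).toNat = m + 1 := by omega
    rw [this, get_indent_loop_eq_altVal code (m + 1) hlen]
    rfl
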